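-- pv_equiv track=rewrite | github.com/Hegmon/smart-locker-hardware | app/hardware_agent/scanner.py | _split_nmcli
-- ===== SOURCE A (Python) =====
-- def _split_nmcli(line: str, expected: int) -> list[str]:
--     parts, current, esc = [], [], False
--
--     for c in line:
--         if esc:
--             current.append(c)
--             esc = False
--             continue
--         if c == "\\":
--             esc = True
--             continue
--         if c == ":" and len(parts) < expected - 1:
--             parts.append("".join(current))
--             current = []
--             continue
--         current.append(c)
--     parts.append("".join(current))
--     while len(parts) < expected:
--         parts.append("")
--
--     return parts
-- ===== SOURCE B (Python) =====
-- def _unescape(s: str) -> str: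
--     # remove one backslash from each escape pair (\X -> X); a trailing lone backslash is dropped
--     out = []
--     i = 0
--     n = len(s)
--     while i < n:
--         c = s[i]
--         if c == "\\":
--             if i + 1 < n:
--                 out.append(s[i + 1])
--             i += 2
--         else:
--             out.append(c)
--             i += 1
--     return "".join(out)
--
--
-- def _split_nmcli(line: str, expected: int) -> list[str]:
--     # pass 1: positions of the first expected-1 unescaped colons
--     cuts, esc = [], False
--     for i, c in enumerate(line):
--         if esc:
--             esc = False
--         elif c == "\\":
--             esc = True
--         elif c == ":" and len(cuts) < expected - 1:
--             cuts.append(i)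
--     # pass 2: cut the line at those positions and un-escape each raw field
--     fields, start = [], 0
--     for p in cuts:
--         fields.append(_unescape(line[start:p]))
--         start = p + 1
--     fields.append(_unescape(line[start:]))
--     return fields + [""] * (expected - len(fields))
-- ===== Notes on version B (the rewrite author's own statement) =====
-- stated objective: alternative
-- what changed: A's single interleaved scan (un-escaping while splitting, then a while-loop pad) is re-decomposed into two independent passes: pass 1 records the positions of the first expected-1 unescaped colons, pass 2 slices the line at those positions and un-escapes each raw field with a small standalone helper, padding by list arithmetic.
import Mathlib
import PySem

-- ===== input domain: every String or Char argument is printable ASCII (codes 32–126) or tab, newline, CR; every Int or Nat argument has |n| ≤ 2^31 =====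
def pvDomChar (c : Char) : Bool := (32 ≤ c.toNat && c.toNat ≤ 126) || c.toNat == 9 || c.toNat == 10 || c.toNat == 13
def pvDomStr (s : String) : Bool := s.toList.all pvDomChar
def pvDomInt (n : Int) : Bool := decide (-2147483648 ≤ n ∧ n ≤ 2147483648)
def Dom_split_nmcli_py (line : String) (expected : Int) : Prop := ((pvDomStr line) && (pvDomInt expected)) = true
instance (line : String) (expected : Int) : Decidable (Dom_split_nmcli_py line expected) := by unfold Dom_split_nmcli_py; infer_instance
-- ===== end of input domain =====

-- B re-decomposes A's single interleaved scan into two independent passes (find the cut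
-- positions of the unescaped colons, then slice and un-escape each raw field separately);
-- same return value, similar cost (objective: alternative).

-- ===== PORT A =====
-- the 'for c in line' loop of A: state (parts, current, esc); after the loop A appends the last field
def loopA (expected : Int) : List Char → List String → List Char → Bool → List String
  | [], parts, current, _ => parts ++ [String.mk current]
  | c :: cs, parts, current, esc =>
    if esc then loopA expected cs parts (current ++ [c]) false
    else if c = '\\' then loopA expected cs parts current true
    else if c = ':' ∧ (parts.length : Int) < expected - 1 then
      loopA expected cs (parts ++ [String.mk current]) [] false
    else loopA expected cs parts (current ++ [c]) false

-- the 'while len(parts) < expected: parts.append("")' loop of A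
def padA (expected : Int) (parts : List String) : List String :=
  if (parts.length : Int) < expected then padA expected (parts ++ [""]) else parts
termination_by (expected - parts.length).toNat
decreasing_by simp; omega

def split_nmcli_py (line : String) (expected : Int) : List String :=
  padA expected (loopA expected line.toList [] [] false)

-- ===== PORT B =====
-- B's _unescape: the index loop advances by 1 (plain char) or 2 (escape pair); a trailing
-- lone backslash appends nothing; ported exactly as structural recursion consuming 1 or 2 chars
def unescapeB : List Char → List Char
  | [] => []
  | c :: rest =>
    if c = '\\' then
      match rest with
      | [] => []
      | x :: r => x :: unescapeB r
    else c :: unescapeB rest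

-- enumerate(line) starting at i
def enumB (i : Nat) : List Char → List (Nat × Char)
  | [] => []
  | c :: cs => (i, c) :: enumB (i + 1) cs

-- B's pass 1: 'for i, c in enumerate(line)' collecting cut positions
def cutsLoopB (expected : Int) : List (Nat × Char) → List Nat → Bool → List Nat
  | [], cuts, _ => cuts
  | (i, c) :: rest, cuts, esc =>
    if esc then cutsLoopB expected rest cuts false
    else if c = '\\' then cutsLoopB expected rest cuts true
    else if c = ':' ∧ (cuts.length : Int) < expected - 1 then
      cutsLoopB expected rest (cuts ++ [i]) false
    else cutsLoopB expected rest cuts false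

-- B's pass 2: 'for p in cuts' slicing line[start:p]; after the loop the tail slice line[start:].
-- Slices: here always 0 ≤ start ≤ p ≤ len(line), where line[start:p] is exactly
-- (l.drop start).take (p - start) and line[start:] is l.drop start.
def fieldsLoopB (l : List Char) : List Nat → List String → Nat → List String
  | [], fields, start => fields ++ [String.mk (unescapeB (l.drop start))]
  | p :: rest, fields, start =>
    fieldsLoopB l rest (fields ++ [String.mk (unescapeB ((l.drop start).take (p - start)))]) (p + 1)

def split_nmcli_py_alt (line : String) (expected : Int) : List String :=
  let l := line.toList
  let fields := fieldsLoopB l (cutsLoopB expected (enumB 0 l) [] false) [] 0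
  fields ++ List.replicate (expected - (fields.length : Int)).toNat ""

-- ===== PRECONDITION & SPEC =====
def Spec_split_nmcli_py (line : String) (expected : Int) (out : List String) : Prop := out = split_nmcli_py_alt line expected
instance (line : String) (expected : Int) (out : List String) : Decidable (Spec_split_nmcli_py line expected out) := by unfold Spec_split_nmcli_py; infer_instance

-- ===== CLAIM (what is proved, stated in full; the proofs are below) =====
def Claim_equal_split_nmcli_py : Prop := ∀ (line : String) (expected : Int), Dom_split_nmcli_py line expected → Spec_split_nmcli_py line expected (split_nmcli_py line expected)

-- ===== LEMMAS AND PROOFS =====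

-- common intermediate: raw (still escaped) fields of a suffix, given the escape state and
-- the number of cuts still allowed
def splitRaw : List Char → Bool → Nat → (List Char × List (List Char))
  | [], _, _ => ([], [])
  | c :: cs, true, k => let r := splitRaw cs false k; (c :: r.1, r.2)
  | c :: cs, false, k =>
    if c = '\\' then let r := splitRaw cs true k; (c :: r.1, r.2)
    else if c = ':' ∧ 0 < k then let r := splitRaw cs false (k - 1); ([], r.1 :: r.2)
    else let r := splitRaw cs false k; (c :: r.1, r.2)

-- unescape of a raw suffix whose first char may be a pending escaped char
def unescE : Bool → List Char → List Char
  | false, f => unescapeB f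
  | true, [] => []
  | true, c :: r => c :: unescapeB r

lemma unescapeB_bs (f : List Char) : unescapeB ('\\' :: f) = unescE true f := by
  cases f <;> simp [unescapeB, unescE]

lemma unescapeB_cons (c : Char) (f : List Char) (h : c ≠ '\\') :
    unescapeB (c :: f) = c :: unescapeB f := by
  cases f <;> simp [unescapeB, h]

-- branch equations (plain unfoldings of the definitions)
lemma loopA_cons (e : Int) (c : Char) (cs : List Char) (parts : List String) (cur : List Char) :
    loopA e (c :: cs) parts cur false =
      if c = '\\' then loopA e cs parts cur true
      else if c = ':' ∧ (parts.length : Int) < e - 1 then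
        loopA e cs (parts ++ [String.mk cur]) [] false
      else loopA e cs parts (cur ++ [c]) false := rfl

lemma loopA_esc (e : Int) (c : Char) (cs : List Char) (parts : List String) (cur : List Char) :
    loopA e (c :: cs) parts cur true = loopA e cs parts (cur ++ [c]) false := rfl

lemma splitRaw_cons (c : Char) (cs : List Char) (k : Nat) :
    splitRaw (c :: cs) false k =
      if c = '\\' then (c :: (splitRaw cs true k).1, (splitRaw cs true k).2)
      else if c = ':' ∧ 0 < k then
        ([], (splitRaw cs false (k - 1)).1 :: (splitRaw cs false (k - 1)).2)
      else (c :: (splitRaw cs false k).1, (splitRaw cs false k).2) := by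
  rfl

lemma splitRaw_esc (c : Char) (cs : List Char) (k : Nat) :
    splitRaw (c :: cs) true k = (c :: (splitRaw cs false k).1, (splitRaw cs false k).2) := rfl

-- A's loop computes exactly the un-escaped fields of splitRaw
lemma loopA_eq (expected : Int) :
    ∀ (cs : List Char) (parts : List String) (cur : List Char) (esc : Bool),
      loopA expected cs parts cur esc =
        parts ++ String.mk (cur ++ unescE esc (splitRaw cs esc ((expected - 1) - (parts.length : Int)).toNat).1)
          :: (splitRaw cs esc ((expected - 1) - (parts.length : Int)).toNat).2.map
              (fun f => String.mk (unescapeB f)) := by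
  intro cs
  induction cs with
  | nil =>
    intro parts cur esc
    cases esc <;> simp [loopA, splitRaw, unescE, unescapeB]
  | cons c cs ih =>
    intro parts cur esc
    cases esc with
    | true =>
      rw [loopA_esc, ih, splitRaw_esc]
      simp [unescE]
    | false =>
      rw [loopA_cons, splitRaw_cons]
      by_cases hbs : c = '\\'
      · subst hbs
        rw [if_pos rfl, if_pos rfl, ih]
        simp [unescE, unescapeB_bs]
      · rw [if_neg hbs, if_neg hbs]
        by_cases hcut : c = ':' ∧ (parts.length : Int) < expected - 1
        · have hk : c = ':' ∧ 0 < ((expected - 1) - (parts.length : Int)).toNat :=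
            ⟨hcut.1, by omega⟩
          rw [if_pos hcut, if_pos hk, ih]
          rw [show ((expected - 1) - (((parts ++ [String.mk cur]).length : Nat) : Int)).toNat
              = ((expected - 1) - (parts.length : Int)).toNat - 1 by simp; omega]
          simp [unescE, unescapeB]
        · have hk : ¬ (c = ':' ∧ 0 < ((expected - 1) - (parts.length : Int)).toNat) := by
            rintro ⟨hc, h0⟩; exact hcut ⟨hc, by omega⟩
          rw [if_neg hcut, if_neg hk, ih]
          simp [unescE, unescapeB_cons c _ hbs]

-- relative-position form of B's pass 1
def cutsF : List Char → Nat → Bool → Nat → List Nat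
  | [], _, _, _ => []
  | _ :: cs, i, true, k => cutsF cs (i + 1) false k
  | c :: cs, i, false, k =>
    if c = '\\' then cutsF cs (i + 1) true k
    else if c = ':' ∧ 0 < k then i :: cutsF cs (i + 1) false (k - 1)
    else cutsF cs (i + 1) false k

lemma cutsLoopB_cons (e : Int) (i : Nat) (c : Char) (rest : List (Nat × Char))
    (cuts : List Nat) :
    cutsLoopB e ((i, c) :: rest) cuts false =
      if c = '\\' then cutsLoopB e rest cuts true
      else if c = ':' ∧ (cuts.length : Int) < e - 1 then cutsLoopB e rest (cuts ++ [i]) false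
      else cutsLoopB e rest cuts false := rfl

lemma cutsLoopB_esc (e : Int) (i : Nat) (c : Char) (rest : List (Nat × Char))
    (cuts : List Nat) :
    cutsLoopB e ((i, c) :: rest) cuts true = cutsLoopB e rest cuts false := rfl

lemma cutsF_cons (c : Char) (cs : List Char) (i : Nat) (k : Nat) :
    cutsF (c :: cs) i false k =
      if c = '\\' then cutsF cs (i + 1) true k
      else if c = ':' ∧ 0 < k then i :: cutsF cs (i + 1) false (k - 1)
      else cutsF cs (i + 1) false k := rfl

lemma cutsLoopB_eq (expected : Int) :
    ∀ (cs : List Char) (i : Nat) (cuts : List Nat) (esc : Bool),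
      cutsLoopB expected (enumB i cs) cuts esc =
        cuts ++ cutsF cs i esc ((expected - 1) - (cuts.length : Int)).toNat := by
  intro cs
  induction cs with
  | nil => intro i cuts esc; cases esc <;> simp [enumB, cutsLoopB, cutsF]
  | cons c cs ih =>
    intro i cuts esc
    cases esc with
    | true => rw [enumB, cutsLoopB_esc, ih]; rfl
    | false =>
      rw [enumB, cutsLoopB_cons, cutsF_cons]
      by_cases hbs : c = '\\'
      · rw [if_pos hbs, if_pos hbs, ih]
      · rw [if_neg hbs, if_neg hbs]
        by_cases hcut : c = ':' ∧ (cuts.length : Int) < expected - 1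
        · have hk : c = ':' ∧ 0 < ((expected - 1) - (cuts.length : Int)).toNat :=
            ⟨hcut.1, by omega⟩
          rw [if_pos hcut, if_pos hk, ih]
          rw [show ((expected - 1) - (((cuts ++ [i]).length : Nat) : Int)).toNat
              = ((expected - 1) - (cuts.length : Int)).toNat - 1 by simp; omega]
          simp
        · have hk : ¬ (c = ':' ∧ 0 < ((expected - 1) - (cuts.length : Int)).toNat) := by
            rintro ⟨hc, h0⟩; exact hcut ⟨hc, by omega⟩
          rw [if_neg hcut, if_neg hk, ih]

lemma cutsF_ge : ∀ (cs : List Char) (i : Nat) (esc : Bool) (k : Nat) (p : Nat),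
    p ∈ cutsF cs i esc k → i ≤ p := by
  intro cs
  induction cs with
  | nil => intro i esc k p h; simp [cutsF] at h
  | cons c cs ih =>
    intro i esc k p h
    cases esc with
    | true => exact Nat.le_of_succ_le (ih (i + 1) false k p (by simpa [cutsF] using h))
    | false =>
      rw [cutsF_cons] at h
      split_ifs at h with h1 h2
      · exact Nat.le_of_succ_le (ih (i + 1) true k p h)
      · rcases List.mem_cons.mp h with h | h
        · omega
        · exact Nat.le_of_succ_le (ih (i + 1) false (k - 1) p h)
      · exact Nat.le_of_succ_le (ih (i + 1) false k p h)

-- the raw char slices of l determined by a cut-position list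
def rawsAll (l : List Char) : Nat → List Nat → List (List Char)
  | start, [] => [l.drop start]
  | start, p :: rest => (l.drop start).take (p - start) :: rawsAll l (p + 1) rest

lemma fieldsLoopB_eq (l : List Char) :
    ∀ (ps : List Nat) (fields : List String) (start : Nat),
      fieldsLoopB l ps fields start =
        fields ++ (rawsAll l start ps).map (fun f => String.mk (unescapeB f)) := by
  intro ps
  induction ps with
  | nil => intro fields start; simp [fieldsLoopB, rawsAll]
  | cons p rest ih => intro fields start; simp [fieldsLoopB, rawsAll, ih]

lemma drop_succ_of_drop {l cs : List Char} {c : Char} {i : Nat}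
    (h : l.drop i = c :: cs) : l.drop (i + 1) = cs := by
  rw [← List.tail_drop, h]; rfl

lemma rawsAll_cons (l : List Char) (ps : List Nat) (i : Nat) (c : Char)
    (hd : l.drop i = c :: l.drop (i + 1))
    (hge : ∀ p ∈ ps, i + 1 ≤ p)
    {f : List Char} {fs : List (List Char)}
    (h : rawsAll l (i + 1) ps = f :: fs) :
    rawsAll l i ps = (c :: f) :: fs := by
  cases ps with
  | nil =>
    simp only [rawsAll] at h ⊢
    injection h with h1 h2
    rw [hd, h1, ← h2]
  | cons p rest =>
    have hp : i + 1 ≤ p := hge p (by simp)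
    simp only [rawsAll] at h ⊢
    have h1 : (l.drop i).take (p - i) = c :: (l.drop (i + 1)).take (p - (i + 1)) := by
      rw [hd]
      have hpi : p - i = (p - (i + 1)) + 1 := by omega
      rw [hpi, List.take_succ_cons]
    rw [h1]
    injection h with h2 h3
    rw [h2, h3]

-- slicing at the cut positions reproduces exactly the raw fields of splitRaw
lemma rawsAll_cutsF (l : List Char) :
    ∀ (cs : List Char) (i : Nat) (esc : Bool) (k : Nat),
      l.drop i = cs →
        rawsAll l i (cutsF cs i esc k) = (splitRaw cs esc k).1 :: (splitRaw cs esc k).2 := by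
  intro cs
  induction cs with
  | nil => intro i esc k h; cases esc <;> simp [cutsF, rawsAll, splitRaw, h]
  | cons c cs ih =>
    intro i esc k h
    have hd : l.drop (i + 1) = cs := drop_succ_of_drop h
    have hd2 : l.drop i = c :: l.drop (i + 1) := by rw [h, hd]
    cases esc with
    | true =>
      have hih := ih (i + 1) false k hd
      rw [show cutsF (c :: cs) i true k = cutsF cs (i + 1) false k from rfl, splitRaw_esc]
      exact rawsAll_cons l _ i c hd2 (fun p hp => cutsF_ge cs (i + 1) false k p hp) hih
    | false =>
      rw [cutsF_cons, splitRaw_cons]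
      by_cases hbs : c = '\\'
      · rw [if_pos hbs, if_pos hbs]
        exact rawsAll_cons l _ i c hd2 (fun p hp => cutsF_ge cs (i + 1) true k p hp)
          (ih (i + 1) true k hd)
      · rw [if_neg hbs, if_neg hbs]
        by_cases hcut : c = ':' ∧ 0 < k
        · rw [if_pos hcut, if_pos hcut]
          have hih := ih (i + 1) false (k - 1) hd
          simp only [rawsAll, Nat.sub_self, List.take_zero, hih]
        · rw [if_neg hcut, if_neg hcut]
          exact rawsAll_cons l _ i c hd2 (fun p hp => cutsF_ge cs (i + 1) false k p hp)
            (ih (i + 1) false k hd)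

-- A's padding while-loop = append of the right number of empties
lemma padA_eq (expected : Int) : ∀ (n : Nat) (parts : List String),
    (expected - (parts.length : Int)).toNat = n →
    padA expected parts = parts ++ List.replicate n "" := by
  intro n
  induction n with
  | zero =>
    intro parts h
    rw [padA, if_neg (by omega)]
    simp
  | succ n ih =>
    intro parts h
    rw [padA, if_pos (by omega)]
    rw [ih (parts ++ [""]) (by simp; omega)]
    simp [List.replicate_succ]

-- ===== VERDICT (by name: the statement is the Claim_ definition above) =====
theorem split_nmcli_py_spec : Claim_equal_split_nmcli_py := by
  intro line expected _
  unfold Spec_split_nmcli_py split_nmcli_py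
  show padA expected (loopA expected line.toList [] [] false) =
    (fieldsLoopB line.toList (cutsLoopB expected (enumB 0 line.toList) [] false) [] 0) ++
      List.replicate (expected -
        (((fieldsLoopB line.toList (cutsLoopB expected (enumB 0 line.toList) [] false) [] 0).length : Nat) : Int)).toNat ""
  rw [loopA_eq, cutsLoopB_eq, fieldsLoopB_eq]
  simp only [List.length_nil, Nat.cast_zero, Int.sub_zero, List.nil_append]
  rw [rawsAll_cutsF line.toList line.toList 0 false (expected - 1).toNat (by simp)]
  rw [show String.mk (unescE false (splitRaw line.toList false (expected - 1).toNat).1) ::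
        List.map (fun f => String.mk (unescapeB f)) (splitRaw line.toList false (expected - 1).toNat).2
      = List.map (fun f => String.mk (unescapeB f))
          ((splitRaw line.toList false (expected - 1).toNat).1 ::
            (splitRaw line.toList false (expected - 1).toNat).2) by simp [unescE]]
  rw [padA_eq expected _ _ rfl]
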